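-- pv_equiv track=rewrite | github.com/RayanHayle/COMSW3203_Discrete_Math | Discrete_Math/Code_three.py | is_onto
-- ===== SOURCE A (Python) =====
-- def is_onto (domain, co_domain, mapping):
--     """Determines if the function is onto.
--
--     Args:
--         domain [list[int]]: a list of values in the domain
--         co_domain [list[int]]: a list of values in the co-domain
--         mapping [dict[int,int]]: a dictionary of the function mapping between the domain and co-domain
--
--     Returns:
--         meets_definition [bool]
--     """
--     # YOUR CODE HERE: METHOD 1
--
--     meets_definition = True
--
--     # find the elements in co domain and set to booleans
--     # check if found and not found .
--
--     for x in co_domain: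
--             x_mapping = False
--
--             for key, value in mapping.items():
--                 if value == x:
--                     x_mapping = True
--                     break
--
--             if not x_mapping:
--                 meets_definition = False
--                 break
--
--     return meets_definition
-- ===== SOURCE B (Python) =====
-- def is_onto(domain, co_domain, mapping):
--     """Determines if the function is onto (same contract as A)."""
--     remaining = set(co_domain)
--     for v in mapping.values():
--         remaining.discard(v)
--         if not remaining:
--             break
--     return not remaining
-- ===== Notes on version B (the rewrite author's own statement) =====
-- stated objective: simpler
-- what changed: Instead of scanning all mapping items for each co-domain element (nested loops), B builds a set of still-uncovered co-domain targets and makes one pass over mapping.values(), discarding each value and stopping once the set is empty.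
import Mathlib
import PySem

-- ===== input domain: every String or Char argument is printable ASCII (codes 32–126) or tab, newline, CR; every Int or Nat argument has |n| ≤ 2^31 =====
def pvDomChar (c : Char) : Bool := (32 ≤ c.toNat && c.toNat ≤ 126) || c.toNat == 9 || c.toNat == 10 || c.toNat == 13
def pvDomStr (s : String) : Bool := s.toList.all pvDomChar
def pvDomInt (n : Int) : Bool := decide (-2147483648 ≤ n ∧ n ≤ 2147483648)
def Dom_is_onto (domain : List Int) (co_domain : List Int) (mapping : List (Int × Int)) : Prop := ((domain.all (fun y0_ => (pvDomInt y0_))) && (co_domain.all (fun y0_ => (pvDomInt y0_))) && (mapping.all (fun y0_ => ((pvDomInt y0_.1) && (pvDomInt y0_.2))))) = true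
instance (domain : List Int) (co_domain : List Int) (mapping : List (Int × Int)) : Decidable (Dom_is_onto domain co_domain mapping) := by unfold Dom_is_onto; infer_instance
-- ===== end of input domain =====

-- B replaces A's nested scan (each co-domain element vs all mapping items) with one pass
-- over the mapping's values that shrinks a set of still-uncovered co-domain targets.


-- ===== PORT A =====
-- inner 'for key, value in mapping.items(): if value == x: x_mapping = True; break'
def isOntoInner (x : Int) : List (Int × Int) → Bool
  | [] => false
  | (_, v) :: rest => if v = x then true else isOntoInner x rest

-- outer 'for x in co_domain: … if not x_mapping: meets_definition = False; break'
def isOntoOuter (items : List (Int × Int)) : List Int → Bool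
  | [] => true
  | x :: rest => if isOntoInner x items then isOntoOuter items rest else false

def is_onto (domain : List Int) (co_domain : List Int) (mapping : List (Int × Int)) : Bool :=
  isOntoOuter (PySem.Dict.ofList mapping).items co_domain

-- ===== PORT B =====
-- 'for v in mapping.values(): remaining.discard(v); if not remaining: break'
def isOntoDiscard (remaining : PySem.Set Int) : List Int → PySem.Set Int
  | [] => remaining
  | v :: vs =>
    let rem' := PySem.Set.discard remaining v
    if rem'.isEmpty then rem' else isOntoDiscard rem' vs

def is_onto_alt (domain : List Int) (co_domain : List Int) (mapping : List (Int × Int)) : Bool :=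
  (isOntoDiscard (PySem.Set.ofList co_domain) (PySem.Dict.ofList mapping).values).isEmpty

-- ===== PRECONDITION & SPEC =====
def Spec_is_onto (domain : List Int) (co_domain : List Int) (mapping : List (Int × Int)) (out : Bool) : Prop := out = is_onto_alt domain co_domain mapping
instance (domain : List Int) (co_domain : List Int) (mapping : List (Int × Int)) (out : Bool) : Decidable (Spec_is_onto domain co_domain mapping out) := by unfold Spec_is_onto; infer_instance

-- ===== CLAIM (what is proved, stated in full; the proofs are below) =====
def Claim_equal_is_onto : Prop := ∀ (domain : List Int) (co_domain : List Int) (mapping : List (Int × Int)), Dom_is_onto domain co_domain mapping → Spec_is_onto domain co_domain mapping (is_onto domain co_domain mapping)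

-- ===== LEMMAS AND PROOFS =====

lemma isOntoInner_eq_true_iff (x : Int) (items : List (Int × Int)) :
    isOntoInner x items = true ↔ x ∈ items.map (·.2) := by
  induction items with
  | nil => simp [isOntoInner]
  | cons p rest ih =>
    obtain ⟨k, v⟩ := p
    simp only [isOntoInner, List.map_cons, List.mem_cons]
    by_cases h : v = x
    · simp [h]
    · rw [if_neg h, ih]
      have : ¬ x = v := fun hh => h hh.symm
      simp [this]

lemma isOntoOuter_eq_true_iff (items : List (Int × Int)) (cd : List Int) :
    isOntoOuter items cd = true ↔ ∀ x ∈ cd, x ∈ items.map (·.2) := by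
  induction cd with
  | nil => simp [isOntoOuter]
  | cons x rest ih =>
    simp only [isOntoOuter, List.mem_cons, forall_eq_or_imp]
    by_cases h : isOntoInner x items = true
    · rw [if_pos h, ih]
      have hx := (isOntoInner_eq_true_iff x items).mp h
      tauto
    · rw [if_neg h]
      have hx : x ∉ items.map (·.2) := fun hm => h ((isOntoInner_eq_true_iff x items).mpr hm)
      simp [hx]

lemma mem_isOntoDiscard_iff (vs : List Int) (rem : PySem.Set Int) (y : Int) :
    y ∈ isOntoDiscard rem vs ↔ y ∈ rem ∧ y ∉ vs := by
  induction vs generalizing rem with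
  | nil => simp [isOntoDiscard]
  | cons v vs ih =>
    simp only [isOntoDiscard]
    split
    · next hemp =>
      have : PySem.Set.discard rem v = [] := by
        simpa [List.isEmpty_iff] using hemp
      constructor
      · intro hy; exact absurd (this ▸ hy) (by simp)
      · rintro ⟨hy, hnv⟩
        have : y ∈ PySem.Set.discard rem v := by
          rw [PySem.Set.mem_discard]; exact ⟨hy, by intro h; exact hnv (by simp [h])⟩
        rw [‹PySem.Set.discard rem v = []›] at this; exact absurd this (by simp)
    · rw [ih, PySem.Set.mem_discard]
      constructor
      · rintro ⟨⟨hy, hne⟩, hnvs⟩; exact ⟨hy, by simp [hne, hnvs]⟩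
      · rintro ⟨hy, hn⟩
        simp only [List.mem_cons, not_or] at hn
        exact ⟨⟨hy, hn.1⟩, hn.2⟩

-- ===== VERDICT (by name: the statement is the Claim_ definition above) =====
theorem is_onto_spec : Claim_equal_is_onto := by
  intro domain co_domain mapping _
  unfold Spec_is_onto is_onto is_onto_alt
  rw [Bool.eq_iff_iff, isOntoOuter_eq_true_iff, List.isEmpty_iff,
      List.eq_nil_iff_forall_not_mem]
  have hvals : (PySem.Dict.ofList mapping).values
      = (PySem.Dict.ofList mapping).items.map (·.2) := rfl
  constructor
  · intro h y hy
    rw [mem_isOntoDiscard_iff] at hy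
    exact hy.2 (hvals ▸ h y (by simpa using hy.1))
  · intro h x hx
    by_contra hnx
    exact h x ((mem_isOntoDiscard_iff _ _ _).mpr ⟨by simpa using hx, hvals ▸ hnx⟩)
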